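-- pv_equiv track=rewrite | github.com/maogongfei-dot/rentalai-backend | rental_app/module3_risk_result.py | _build_recommended_actions
-- ===== SOURCE A (Python) =====
-- RISK_EXPLANATIONS_MAP = {
--     "deposit_risk": {
--         "title": "Deposit issue",
--         "explanation": "The text may involve deposit protection or deposit return concerns.",
--         "actions": [
--             "Check whether the deposit is protected in an approved scheme.",
--             "Keep payment records and tenancy documents.",
--         ],
--     },
--     "notice_risk": {
--         "title": "Notice period issue",
--         "explanation": "The text may involve notice to leave or notice period concerns.",
--         "actions": [
--             "Check the tenancy agreement for the required notice period.",
--             "Keep written records of any notice given or received.",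
--         ],
--     },
--     "repair_risk": {
--         "title": "Repair issue",
--         "explanation": "The text may raise maintenance or repair responsibility concerns.",
--         "actions": [
--             "Document the repair issue with photos and dates.",
--             "Check what the tenancy agreement says about repair responsibilities.",
--         ],
--     },
--     "landlord_entry_risk": {
--         "title": "Landlord entry / access issue",
--         "explanation": "The text may involve landlord access or entry without proper notice.",
--         "actions": [
--             "Check the tenancy agreement and law on landlord access and notice.",
--             "Keep a record of any unauthorised entry or short notice.",
--         ],
--     },
--     "rent_increase_risk": {
--         "title": "Rent increase issue",
--         "explanation": "The text may involve rent increase or rent review concerns.",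
--         "actions": [
--             "Check whether the rent increase and procedure comply with the tenancy and law.",
--             "Keep records of the current rent and any notice of increase.",
--         ],
--     },
--     "eviction_risk": {
--         "title": "Eviction / possession issue",
--         "explanation": "The text may involve eviction, possession, or being asked to leave.",
--         "actions": [
--             "Check that any notice or court process is valid (e.g. section 21 / section 8).",
--             "Seek advice early if you are at risk of losing your home.",
--         ],
--     },
--     "fee_charge_risk": {
--         "title": "Fee or charge issue",
--         "explanation": "The text may involve extra fees, charges, or penalties.",
--         "actions": [
--             "Check the tenancy agreement and law on permitted fees and charges.",
--             "Keep receipts and records of any payments demanded.",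
--         ],
--     },
-- }
--
-- DEFAULT_ACTIONS_WHEN_NO_RISK = [
--     "Review the full context before drawing a conclusion.",
--     "No obvious baseline risk was detected, but you may still want to check the tenancy details carefully.",
-- ]
--
-- RISK_SEVERITY_PRIORITY_MAP = {
--     "eviction_risk": {"severity": "high", "priority": "high"},
--     "landlord_entry_risk": {"severity": "high", "priority": "high"},
--     "deposit_risk": {"severity": "medium", "priority": "medium"},
--     "repair_risk": {"severity": "medium", "priority": "medium"},
--     "notice_risk": {"severity": "medium", "priority": "medium"},
--     "rent_increase_risk": {"severity": "medium", "priority": "medium"},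
--     "fee_charge_risk": {"severity": "low", "priority": "low"},
-- }
--
-- PRIORITY_ORDER = ("high", "medium", "low")  # 用于 recommended_actions 排序
--
-- def _build_recommended_actions(risk_flags):
--     """收集各命中 flag 的 actions，按 priority 高→中→低排序后去重；无命中时返回默认建议。"""
--     if not risk_flags:
--         return list(DEFAULT_ACTIONS_WHEN_NO_RISK)
--     items = []
--     for flag in risk_flags:
--         sp = RISK_SEVERITY_PRIORITY_MAP.get(flag) or {}
--         p = sp.get("priority") or "medium"
--         rank = PRIORITY_ORDER.index(p) if p in PRIORITY_ORDER else 1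
--         for a in (RISK_EXPLANATIONS_MAP.get(flag) or {}).get("actions") or []:
--             a = (a or "").strip()
--             if a:
--                 items.append((rank, a))
--     items.sort(key=lambda x: x[0])
--     seen = set()
--     out = []
--     for _, a in items:
--         if a not in seen:
--             seen.add(a)
--             out.append(a)
--     return out if out else list(DEFAULT_ACTIONS_WHEN_NO_RISK)
-- ===== SOURCE B (Python) =====
-- RISK_EXPLANATIONS_MAP = {
--     "deposit_risk": {
--         "title": "Deposit issue",
--         "explanation": "The text may involve deposit protection or deposit return concerns.",
--         "actions": [
--             "Check whether the deposit is protected in an approved scheme.",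
--             "Keep payment records and tenancy documents.",
--         ],
--     },
--     "notice_risk": {
--         "title": "Notice period issue",
--         "explanation": "The text may involve notice to leave or notice period concerns.",
--         "actions": [
--             "Check the tenancy agreement for the required notice period.",
--             "Keep written records of any notice given or received.",
--         ],
--     },
--     "repair_risk": {
--         "title": "Repair issue",
--         "explanation": "The text may raise maintenance or repair responsibility concerns.",
--         "actions": [
--             "Document the repair issue with photos and dates.",
--             "Check what the tenancy agreement says about repair responsibilities.",
--         ],
--     },
--     "landlord_entry_risk": {
--         "title": "Landlord entry / access issue",
--         "explanation": "The text may involve landlord access or entry without proper notice.",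
--         "actions": [
--             "Check the tenancy agreement and law on landlord access and notice.",
--             "Keep a record of any unauthorised entry or short notice.",
--         ],
--     },
--     "rent_increase_risk": {
--         "title": "Rent increase issue",
--         "explanation": "The text may involve rent increase or rent review concerns.",
--         "actions": [
--             "Check whether the rent increase and procedure comply with the tenancy and law.",
--             "Keep records of the current rent and any notice of increase.",
--         ],
--     },
--     "eviction_risk": {
--         "title": "Eviction / possession issue",
--         "explanation": "The text may involve eviction, possession, or being asked to leave.",
--         "actions": [
--             "Check that any notice or court process is valid (e.g. section 21 / section 8).",
--             "Seek advice early if you are at risk of losing your home.",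
--         ],
--     },
--     "fee_charge_risk": {
--         "title": "Fee or charge issue",
--         "explanation": "The text may involve extra fees, charges, or penalties.",
--         "actions": [
--             "Check the tenancy agreement and law on permitted fees and charges.",
--             "Keep receipts and records of any payments demanded.",
--         ],
--     },
-- }
--
-- DEFAULT_ACTIONS_WHEN_NO_RISK = [
--     "Review the full context before drawing a conclusion.",
--     "No obvious baseline risk was detected, but you may still want to check the tenancy details carefully.",
-- ]
--
-- RISK_SEVERITY_PRIORITY_MAP = {
--     "eviction_risk": {"severity": "high", "priority": "high"},
--     "landlord_entry_risk": {"severity": "high", "priority": "high"},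
--     "deposit_risk": {"severity": "medium", "priority": "medium"},
--     "repair_risk": {"severity": "medium", "priority": "medium"},
--     "notice_risk": {"severity": "medium", "priority": "medium"},
--     "rent_increase_risk": {"severity": "medium", "priority": "medium"},
--     "fee_charge_risk": {"severity": "low", "priority": "low"},
-- }
--
-- PRIORITY_ORDER = ("high", "medium", "low")
--
-- # Priority of each known flag, flattened once from RISK_SEVERITY_PRIORITY_MAP.
-- PRIORITY_OF_FLAG = {f: sp["priority"] for f, sp in RISK_SEVERITY_PRIORITY_MAP.items()}
--
--
-- def _build_recommended_actions(risk_flags):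
--     """Bucket the actions by priority in one pass, then concatenate the buckets
--     high -> medium -> low and keep first occurrences; no sort needed."""
--     if not risk_flags:
--         return list(DEFAULT_ACTIONS_WHEN_NO_RISK)
--     buckets = {p: [] for p in PRIORITY_ORDER}
--     for flag in risk_flags:
--         p = PRIORITY_OF_FLAG.get(flag, "medium")
--         info = RISK_EXPLANATIONS_MAP.get(flag)
--         for a in (info["actions"] if info else ()):
--             a = a.strip()
--             if a:
--                 buckets[p].append(a)
--     merged = [a for p in PRIORITY_ORDER for a in buckets[p]]
--     out = list(dict.fromkeys(merged))
--     return out or list(DEFAULT_ACTIONS_WHEN_NO_RISK)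
-- ===== Notes on version B (the rewrite author's own statement) =====
-- stated objective: simpler
-- what changed: B drops A's build-(rank,action)-pairs-then-stable-sort: it appends stripped actions into three priority buckets in one pass, concatenates them high/medium/low, and dedups with dict.fromkeys.
import Mathlib
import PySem

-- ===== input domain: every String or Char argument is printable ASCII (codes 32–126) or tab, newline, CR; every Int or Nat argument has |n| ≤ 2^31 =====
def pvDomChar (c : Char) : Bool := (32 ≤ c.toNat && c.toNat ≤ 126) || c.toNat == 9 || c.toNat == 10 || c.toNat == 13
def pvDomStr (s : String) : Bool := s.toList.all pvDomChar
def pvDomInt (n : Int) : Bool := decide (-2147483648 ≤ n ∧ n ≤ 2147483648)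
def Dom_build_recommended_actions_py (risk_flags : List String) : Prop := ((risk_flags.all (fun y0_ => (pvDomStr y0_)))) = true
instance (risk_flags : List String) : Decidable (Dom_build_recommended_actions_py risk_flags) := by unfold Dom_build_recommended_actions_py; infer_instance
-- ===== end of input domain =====

-- B replaces A's build-pairs-then-stable-sort with one pass into three priority buckets
-- concatenated high→medium→low and an ordered dedup (objective: simpler; equal asymptotic cost).

-- ===== PORT A =====

structure RiskInfo where
  title : String
  explanation : String
  actions : List String
deriving Repr, DecidableEq

-- RISK_EXPLANATIONS_MAP: heterogeneous dict values ported as a structure (title/explanation/actions)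
def RISK_EXPLANATIONS_MAP : PySem.Dict String RiskInfo := PySem.Dict.mk [
  ("deposit_risk", ⟨"Deposit issue",
    "The text may involve deposit protection or deposit return concerns.",
    ["Check whether the deposit is protected in an approved scheme.",
     "Keep payment records and tenancy documents."]⟩),
  ("notice_risk", ⟨"Notice period issue",
    "The text may involve notice to leave or notice period concerns.",
    ["Check the tenancy agreement for the required notice period.",
     "Keep written records of any notice given or received."]⟩),
  ("repair_risk", ⟨"Repair issue",
    "The text may raise maintenance or repair responsibility concerns.",
    ["Document the repair issue with photos and dates.",
     "Check what the tenancy agreement says about repair responsibilities."]⟩),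
  ("landlord_entry_risk", ⟨"Landlord entry / access issue",
    "The text may involve landlord access or entry without proper notice.",
    ["Check the tenancy agreement and law on landlord access and notice.",
     "Keep a record of any unauthorised entry or short notice."]⟩),
  ("rent_increase_risk", ⟨"Rent increase issue",
    "The text may involve rent increase or rent review concerns.",
    ["Check whether the rent increase and procedure comply with the tenancy and law.",
     "Keep records of the current rent and any notice of increase."]⟩),
  ("eviction_risk", ⟨"Eviction / possession issue",
    "The text may involve eviction, possession, or being asked to leave.",
    ["Check that any notice or court process is valid (e.g. section 21 / section 8).",
     "Seek advice early if you are at risk of losing your home."]⟩),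
  ("fee_charge_risk", ⟨"Fee or charge issue",
    "The text may involve extra fees, charges, or penalties.",
    ["Check the tenancy agreement and law on permitted fees and charges.",
     "Keep receipts and records of any payments demanded."]⟩)]

def DEFAULT_ACTIONS_WHEN_NO_RISK : List String := [
  "Review the full context before drawing a conclusion.",
  "No obvious baseline risk was detected, but you may still want to check the tenancy details carefully."]

def RISK_SEVERITY_PRIORITY_MAP : PySem.Dict String (PySem.Dict String String) := PySem.Dict.mk [
  ("eviction_risk", PySem.Dict.mk [("severity", "high"), ("priority", "high")]),
  ("landlord_entry_risk", PySem.Dict.mk [("severity", "high"), ("priority", "high")]),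
  ("deposit_risk", PySem.Dict.mk [("severity", "medium"), ("priority", "medium")]),
  ("repair_risk", PySem.Dict.mk [("severity", "medium"), ("priority", "medium")]),
  ("notice_risk", PySem.Dict.mk [("severity", "medium"), ("priority", "medium")]),
  ("rent_increase_risk", PySem.Dict.mk [("severity", "medium"), ("priority", "medium")]),
  ("fee_charge_risk", PySem.Dict.mk [("severity", "low"), ("priority", "low")])]

def PRIORITY_ORDER : List String := ["high", "medium", "low"]

-- inner loop body of A: 'a = (a or "").strip(); if a: items.append((rank, a))'
-- ('a or ""' is the identity on a string a)
def A_item_step (rank : Int) (items : List (Int × String)) (a : String) : List (Int × String) :=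
  let a' := PySem.Str.strip a
  if a' ≠ "" then items ++ [(rank, a')] else items

-- body of A's 'for flag in risk_flags' loop
def A_step (items : List (Int × String)) (flag : String) : List (Int × String) :=
  -- sp = RISK_SEVERITY_PRIORITY_MAP.get(flag) or {}
  let sp : PySem.Dict String String := (PySem.Dict.get? RISK_SEVERITY_PRIORITY_MAP flag).getD (PySem.Dict.mk [])
  -- p = sp.get("priority") or "medium"
  let p : String := match PySem.Dict.get? sp "priority" with
    | some s => if s ≠ "" then s else "medium"
    | none => "medium"
  -- rank = PRIORITY_ORDER.index(p) if p in PRIORITY_ORDER else 1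
  let rank : Int := if PRIORITY_ORDER.contains p then
      (((PySem.List.index? PRIORITY_ORDER p).getD 0 : Nat) : Int) else 1
  -- for a in (RISK_EXPLANATIONS_MAP.get(flag) or {}).get("actions") or []
  let acts : List String := match PySem.Dict.get? RISK_EXPLANATIONS_MAP flag with
    | some info => info.actions
    | none => []
  acts.foldl (A_item_step rank) items

-- body of A's dedup loop: 'if a not in seen: seen.add(a); out.append(a)'
def A_dedup_step (st : PySem.Set String × List String) (x : Int × String) :
    PySem.Set String × List String :=
  if PySem.Set.contains st.1 x.2 then st else (PySem.Set.add st.1 x.2, st.2 ++ [x.2])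

def build_recommended_actions_py (risk_flags : List String) : List String :=
  if risk_flags = [] then DEFAULT_ACTIONS_WHEN_NO_RISK
  else
    let items := risk_flags.foldl A_step []
    let sortedItems := PySem.List.sorted items (fun x => x.1) false
    let out := (sortedItems.foldl A_dedup_step (PySem.Set.empty, [])).2
    if out ≠ [] then out else DEFAULT_ACTIONS_WHEN_NO_RISK

-- ===== PORT B =====

-- PRIORITY_OF_FLAG = {f: sp["priority"] for f, sp in RISK_SEVERITY_PRIORITY_MAP.items()}
-- (sp["priority"] is present in every entry of the literal map, so getD's default is never used)
def PRIORITY_OF_FLAG : PySem.Dict String String :=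
  PySem.Dict.mk (RISK_SEVERITY_PRIORITY_MAP.items.map (fun q => (q.1, PySem.Dict.getD q.2 "priority" "")))

-- inner loop body of B; the triple (high, medium, low) is the buckets dict keyed by p
def B_item_step (p : String) (bk : List String × List String × List String) (a : String) :
    List String × List String × List String :=
  let a' := PySem.Str.strip a
  if a' ≠ "" then
    if p = "high" then (bk.1 ++ [a'], bk.2.1, bk.2.2)
    else if p = "low" then (bk.1, bk.2.1, bk.2.2 ++ [a'])
    else (bk.1, bk.2.1 ++ [a'], bk.2.2)
  else bk

-- body of B's 'for flag in risk_flags' loop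
def B_step (bk : List String × List String × List String) (flag : String) :
    List String × List String × List String :=
  let p := PySem.Dict.getD PRIORITY_OF_FLAG flag "medium"
  let acts : List String := match PySem.Dict.get? RISK_EXPLANATIONS_MAP flag with
    | some info => info.actions
    | none => []
  acts.foldl (B_item_step p) bk

def build_recommended_actions_py_alt (risk_flags : List String) : List String :=
  if risk_flags = [] then DEFAULT_ACTIONS_WHEN_NO_RISK
  else
    let bk := risk_flags.foldl B_step ([], [], [])
    let merged := bk.1 ++ bk.2.1 ++ bk.2.2
    let out := PySem.List.dedup merged
    if out ≠ [] then out else DEFAULT_ACTIONS_WHEN_NO_RISK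

-- ===== PRECONDITION & SPEC =====
def Spec_build_recommended_actions_py (risk_flags : List String) (out : List String) : Prop := out = build_recommended_actions_py_alt risk_flags
instance (risk_flags : List String) (out : List String) : Decidable (Spec_build_recommended_actions_py risk_flags out) := by unfold Spec_build_recommended_actions_py; infer_instance

-- ===== CLAIM (what is proved, stated in full; the proofs are below) =====
def Claim_equal_build_recommended_actions_py : Prop := ∀ (risk_flags : List String), Dom_build_recommended_actions_py risk_flags → Spec_build_recommended_actions_py risk_flags (build_recommended_actions_py risk_flags)

-- ===== LEMMAS AND PROOFS =====

-- the stripped, non-empty actions of a flag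
def stripKeep (acts : List String) : List String :=
  (acts.filter (fun a => PySem.Str.strip a ≠ "")).map PySem.Str.strip

def actsOf (flag : String) : List String :=
  match PySem.Dict.get? RISK_EXPLANATIONS_MAP flag with
  | some info => info.actions
  | none => []

def pOf (flag : String) : String := PySem.Dict.getD PRIORITY_OF_FLAG flag "medium"

def rankOf (flag : String) : Int :=
  let sp : PySem.Dict String String := (PySem.Dict.get? RISK_SEVERITY_PRIORITY_MAP flag).getD (PySem.Dict.mk [])
  let p : String := match PySem.Dict.get? sp "priority" with
    | some s => if s ≠ "" then s else "medium"
    | none => "medium"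
  if PRIORITY_ORDER.contains p then
    (((PySem.List.index? PRIORITY_ORDER p).getD 0 : Nat) : Int) else 1

-- A's per-flag block of (rank, action) pairs
def blockA (flag : String) : List (Int × String) :=
  (stripKeep (actsOf flag)).map (fun a => (rankOf flag, a))

lemma A_item_fold (rank : Int) (acts : List String) (acc : List (Int × String)) :
    acts.foldl (A_item_step rank) acc = acc ++ (stripKeep acts).map (fun a => (rank, a)) := by
  induction acts generalizing acc with
  | nil => simp [stripKeep]
  | cons a t ih =>
    simp only [List.foldl_cons, ih, A_item_step, stripKeep]
    by_cases hs : PySem.Str.strip a = "" <;> simp [hs]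

lemma A_items_eq (flags : List String) (acc : List (Int × String)) :
    flags.foldl A_step acc = acc ++ flags.flatMap blockA := by
  induction flags generalizing acc with
  | nil => simp
  | cons f t ih =>
    have hstep : A_step acc f = acc ++ blockA f := by
      simp only [A_step]; rw [A_item_fold]; rfl
    simp only [List.foldl_cons, hstep, ih, List.flatMap_cons, List.append_assoc]

lemma A_dedup_fold (l : List (Int × String)) (t : List String) :
    l.foldl A_dedup_step (t, t) =
      ((l.map (·.2)).foldl PySem.Set.add t, (l.map (·.2)).foldl PySem.Set.add t) := by
  induction l generalizing t with
  | nil => simp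
  | cons x xs ih =>
    have hstep : A_dedup_step (t, t) x = (PySem.Set.add t x.2, PySem.Set.add t x.2) := by
      by_cases h : x.2 ∈ t <;>
        simp [A_dedup_step, PySem.Set.add, PySem.Set.contains, h]
    simp only [List.foldl_cons, List.map_cons, hstep, ih]

lemma insertBy_append_left {α : Type} (before : α → α → Bool) (x : α) (as bs : List α)
    (h : ∀ a ∈ as, before x a = false) :
    PySem.List.insertBy before x (as ++ bs) = as ++ PySem.List.insertBy before x bs := by
  induction as with
  | nil => simp
  | cons a as ih =>
    simp only [List.cons_append, PySem.List.insertBy, h a (by simp), Bool.false_eq_true,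
      if_false, List.cons.injEq, true_and]
    exact ih (fun a ha => h a (by simp [ha]))

lemma insertBy_all_before {α : Type} (before : α → α → Bool) (x : α) (bs : List α)
    (h : ∀ b ∈ bs, before x b = true) :
    PySem.List.insertBy before x bs = x :: bs := by
  cases bs with
  | nil => rfl
  | cons b bs => simp [PySem.List.insertBy, h b (by simp)]

lemma bucket_fold (xs : List (Int × String)) (f0 f1 f2 : List (Int × String))
    (h0 : ∀ a ∈ f0, a.1 = 0) (h1 : ∀ a ∈ f1, a.1 = 1) (h2 : ∀ a ∈ f2, a.1 = 2)
    (hx : ∀ x ∈ xs, x.1 = 0 ∨ x.1 = 1 ∨ x.1 = 2) :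
    xs.foldl (fun acc x => PySem.List.insertBy (fun a b => decide (a.1 < b.1)) x acc)
      (f0 ++ f1 ++ f2) =
      (f0 ++ xs.filter (fun x => x.1 = 0)) ++ (f1 ++ xs.filter (fun x => x.1 = 1)) ++
        (f2 ++ xs.filter (fun x => x.1 = 2)) := by
  induction xs generalizing f0 f1 f2 with
  | nil => simp
  | cons x xs ih =>
    have hxs : ∀ y ∈ xs, y.1 = 0 ∨ y.1 = 1 ∨ y.1 = 2 := fun y hy => hx y (by simp [hy])
    simp only [List.foldl_cons, List.filter_cons]
    rcases hx x (by simp) with hk | hk | hk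
    · have e1 : PySem.List.insertBy (fun a b => decide (a.1 < b.1)) x (f0 ++ f1 ++ f2)
          = f0 ++ [x] ++ f1 ++ f2 := by
        rw [List.append_assoc,
          insertBy_append_left _ _ _ _ (fun a ha => by simp [hk, h0 a ha]),
          insertBy_all_before _ _ _ (fun b hb => by
            rcases List.mem_append.1 hb with hb | hb
            · simp [hk, h1 b hb]
            · simp [hk, h2 b hb])]
        simp
      rw [e1, ih (f0 ++ [x]) f1 f2
        (fun a ha => by rcases List.mem_append.1 ha with ha | ha
                        · exact h0 a ha
                        · simp at ha; simp [ha, hk]) h1 h2 hxs]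
      simp [hk]
    · have e1 : PySem.List.insertBy (fun a b => decide (a.1 < b.1)) x (f0 ++ f1 ++ f2)
          = f0 ++ (f1 ++ [x]) ++ f2 := by
        rw [List.append_assoc, List.append_assoc,
          insertBy_append_left _ _ _ _ (fun a ha => by simp [hk, h0 a ha]),
          insertBy_append_left _ _ _ _ (fun a ha => by simp [hk, h1 a ha]),
          insertBy_all_before _ _ _ (fun b hb => by simp [hk, h2 b hb])]
        simp
      rw [e1, ih f0 (f1 ++ [x]) f2 h0
        (fun a ha => by rcases List.mem_append.1 ha with ha | ha
                        · exact h1 a ha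
                        · simp at ha; simp [ha, hk]) h2 hxs]
      simp [hk]
    · have e1 : PySem.List.insertBy (fun a b => decide (a.1 < b.1)) x (f0 ++ f1 ++ f2)
          = f0 ++ f1 ++ (f2 ++ [x]) := by
        rw [PySem.List.insertBy_of_forall_not_before _ _ _ (fun a ha => by
          rcases List.mem_append.1 ha with ha | ha
          · rcases List.mem_append.1 ha with ha | ha
            · simp [hk, h0 a ha]
            · simp [hk, h1 a ha]
          · simp [hk, h2 a ha])]
        simp
      rw [e1, ih f0 f1 (f2 ++ [x]) h0 h1
        (fun a ha => by rcases List.mem_append.1 ha with ha | ha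
                        · exact h2 a ha
                        · simp at ha; simp [ha, hk]) hxs]
      simp [hk]

lemma sorted_three (xs : List (Int × String))
    (hx : ∀ x ∈ xs, x.1 = 0 ∨ x.1 = 1 ∨ x.1 = 2) :
    PySem.List.sorted xs (fun x => x.1) false =
      xs.filter (fun x => x.1 = 0) ++ xs.filter (fun x => x.1 = 1) ++
        xs.filter (fun x => x.1 = 2) := by
  rw [PySem.List.sorted_eq_foldl_insertBy]
  have h := bucket_fold xs [] [] [] (by simp) (by simp) (by simp) hx
  simpa using h

lemma B_item_fold (p : String) (acts : List String) (h m l : List String) :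
    acts.foldl (B_item_step p) (h, m, l) =
      (h ++ (if p = "high" then stripKeep acts else []),
       m ++ (if p = "high" ∨ p = "low" then [] else stripKeep acts),
       l ++ (if p = "low" then stripKeep acts else [])) := by
  induction acts generalizing h m l with
  | nil => simp [stripKeep]
  | cons a t ih =>
    simp only [List.foldl_cons]
    by_cases hs : PySem.Str.strip a = ""
    · rw [show B_item_step p (h, m, l) a = (h, m, l) from by simp [B_item_step, hs], ih]
      simp [stripKeep, hs]
    · by_cases hp : p = "high"
      · rw [show B_item_step p (h, m, l) a = (h ++ [PySem.Str.strip a], m, l) from by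
          simp [B_item_step, hs, hp], ih]
        simp [stripKeep, hs, hp]
      · by_cases hl : p = "low"
        · rw [show B_item_step p (h, m, l) a = (h, m, l ++ [PySem.Str.strip a]) from by
            simp [B_item_step, hs, hl], ih]
          simp [stripKeep, hs, hl]
        · rw [show B_item_step p (h, m, l) a = (h, m ++ [PySem.Str.strip a], l) from by
            simp [B_item_step, hs, hp, hl], ih]
          simp [stripKeep, hs, hp, hl]

def hOf (flag : String) : List String := if pOf flag = "high" then stripKeep (actsOf flag) else []
def mOf (flag : String) : List String :=
  if pOf flag = "high" ∨ pOf flag = "low" then [] else stripKeep (actsOf flag)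
def lOf (flag : String) : List String := if pOf flag = "low" then stripKeep (actsOf flag) else []

lemma B_buckets_eq (flags : List String) (h m l : List String) :
    flags.foldl B_step (h, m, l) =
      (h ++ flags.flatMap hOf, m ++ flags.flatMap mOf, l ++ flags.flatMap lOf) := by
  induction flags generalizing h m l with
  | nil => simp
  | cons f t ih =>
    have hstep : B_step (h, m, l) f = (h ++ hOf f, m ++ mOf f, l ++ lOf f) := by
      simp only [B_step]; rw [B_item_fold]; rfl
    simp only [List.foldl_cons, hstep, ih, List.flatMap_cons, List.append_assoc]

lemma flag_facts (flag : String) :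
    (pOf flag = "high" ∨ pOf flag = "medium" ∨ pOf flag = "low") ∧
      rankOf flag = (if pOf flag = "high" then 0 else if pOf flag = "low" then 2 else 1) := by
  by_cases h1 : flag = "eviction_risk"
  · subst h1; decide
  by_cases h2 : flag = "landlord_entry_risk"
  · subst h2; decide
  by_cases h3 : flag = "deposit_risk"
  · subst h3; decide
  by_cases h4 : flag = "repair_risk"
  · subst h4; decide
  by_cases h5 : flag = "notice_risk"
  · subst h5; decide
  by_cases h6 : flag = "rent_increase_risk"
  · subst h6; decide
  by_cases h7 : flag = "fee_charge_risk"
  · subst h7; decide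
  have e1 : ("eviction_risk" == flag) = false := by simp [Ne.symm h1]
  have e2 : ("landlord_entry_risk" == flag) = false := by simp [Ne.symm h2]
  have e3 : ("deposit_risk" == flag) = false := by simp [Ne.symm h3]
  have e4 : ("repair_risk" == flag) = false := by simp [Ne.symm h4]
  have e5 : ("notice_risk" == flag) = false := by simp [Ne.symm h5]
  have e6 : ("rent_increase_risk" == flag) = false := by simp [Ne.symm h6]
  have e7 : ("fee_charge_risk" == flag) = false := by simp [Ne.symm h7]
  simp [pOf, rankOf, PySem.Dict.getD, PySem.Dict.get?, PRIORITY_OF_FLAG,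
    RISK_SEVERITY_PRIORITY_MAP, PRIORITY_ORDER, List.find?, e1, e2, e3, e4, e5, e6, e7]
  decide

lemma block_filter0 (f : String) :
    (((blockA f).filter (fun x => x.1 = 0)).map (·.2)) = hOf f := by
  obtain ⟨hp, hr⟩ := flag_facts f
  rcases hp with hp | hp | hp <;> simp [hp] at hr <;>
    simp [blockA, hOf, hp, hr, List.filter_map, Function.comp, List.map_map]

lemma block_filter1 (f : String) :
    (((blockA f).filter (fun x => x.1 = 1)).map (·.2)) = mOf f := by
  obtain ⟨hp, hr⟩ := flag_facts f
  rcases hp with hp | hp | hp <;> simp [hp] at hr <;>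
    simp [blockA, mOf, hp, hr, List.filter_map, Function.comp, List.map_map]

lemma block_filter2 (f : String) :
    (((blockA f).filter (fun x => x.1 = 2)).map (·.2)) = lOf f := by
  obtain ⟨hp, hr⟩ := flag_facts f
  rcases hp with hp | hp | hp <;> simp [hp] at hr <;>
    simp [blockA, lOf, hp, hr, List.filter_map, Function.comp, List.map_map]

-- ===== VERDICT (by name: the statement is the Claim_ definition above) =====
theorem build_recommended_actions_py_spec : Claim_equal_build_recommended_actions_py := by
  intro flags _
  unfold Spec_build_recommended_actions_py
  by_cases hnil : flags = []
  · simp [build_recommended_actions_py, build_recommended_actions_py_alt, hnil]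
  · simp only [build_recommended_actions_py, build_recommended_actions_py_alt, if_neg hnil]
    rw [A_items_eq flags [], B_buckets_eq flags [] [] []]
    simp only [List.nil_append]
    have hkeys : ∀ x ∈ flags.flatMap blockA, x.1 = 0 ∨ x.1 = 1 ∨ x.1 = 2 := by
      intro x hxm
      rcases List.mem_flatMap.1 hxm with ⟨f, _, hbx⟩
      obtain ⟨hp, hr⟩ := flag_facts f
      simp only [blockA, List.mem_map] at hbx
      rcases hbx with ⟨a, _, rfl⟩
      rcases hp with hp | hp | hp <;> simp [hp] at hr <;> simp [hr]
    rw [sorted_three _ hkeys]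
    rw [show ((PySem.Set.empty : PySem.Set String), ([] : List String)) =
        (([] : List String), ([] : List String)) from rfl, A_dedup_fold _ []]
    have hmerge :
        ((flags.flatMap blockA).filter (fun x => x.1 = 0) ++
          (flags.flatMap blockA).filter (fun x => x.1 = 1) ++
          (flags.flatMap blockA).filter (fun x => x.1 = 2)).map (·.2) =
        flags.flatMap hOf ++ flags.flatMap mOf ++ flags.flatMap lOf := by
      simp only [List.map_append, List.filter_flatMap, List.map_flatMap,
        block_filter0, block_filter1, block_filter2]
    rw [hmerge]
    rfl
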